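-- pv_equiv track=rewrite | github.com/kylestang/tic-tac-toe | tools/all_boards.py | is_normalized
-- ===== SOURCE A (Python) =====
-- def get_tile_value(board: int, tile: int):
--     assert 0 <= tile <= 8
--     return (board >> (tile * 2)) & 0b11
--
-- def rotate_board_90(board: int):
--     n = 0
--     n |= get_tile_value(board, 6)
--     n |= get_tile_value(board, 3) << 2
--     n |= get_tile_value(board, 0) << 4
--     n |= get_tile_value(board, 7) << 6
--     n |= get_tile_value(board, 4) << 8
--     n |= get_tile_value(board, 1) << 10
--     n |= get_tile_value(board, 8) << 12
--     n |= get_tile_value(board, 5) << 14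
--     n |= get_tile_value(board, 2) << 16
--     return n
--
-- def flip_horizontally(board: int):
--     n = 0
--     n |= (board & 0b111111) << 12
--     n |= board & (0b111111 << 6)
--     n |= (board >> 12) & 0b111111
--     return n
--
-- def is_normalized(board: int, normalized_boards: list[int]) -> bool:
--     for _ in range(4):
--         if board in normalized_boards:
--             return True
--         else:
--             board = rotate_board_90(board)
--
--     board = flip_horizontally(board)
--     for _ in range(4):
--         if board in normalized_boards:
--             return True
--         else:
--             board = rotate_board_90(board)
--
--     return False
-- ===== SOURCE B (Python) =====
-- def get_tile_value(board: int, tile: int):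
--     assert 0 <= tile <= 8
--     return (board >> (tile * 2)) & 0b11
--
-- def rotate_board_90(board: int):
--     n = 0
--     n |= get_tile_value(board, 6)
--     n |= get_tile_value(board, 3) << 2
--     n |= get_tile_value(board, 0) << 4
--     n |= get_tile_value(board, 7) << 6
--     n |= get_tile_value(board, 4) << 8
--     n |= get_tile_value(board, 1) << 10
--     n |= get_tile_value(board, 8) << 12
--     n |= get_tile_value(board, 5) << 14
--     n |= get_tile_value(board, 2) << 16
--     return n
--
-- def flip_horizontally(board: int):
--     n = 0
--     n |= (board & 0b111111) << 12
--     n |= board & (0b111111 << 6)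
--     n |= (board >> 12) & 0b111111
--     return n
--
-- def is_normalized(board: int, normalized_boards: list[int]) -> bool:
--     # Straight-line construction of the orbit as a hash set (no loop, no list scans).
--     r0 = board
--     r1 = rotate_board_90(r0)
--     r2 = rotate_board_90(r1)
--     r3 = rotate_board_90(r2)
--     f0 = flip_horizontally(rotate_board_90(r3))
--     f1 = rotate_board_90(f0)
--     f2 = rotate_board_90(f1)
--     f3 = rotate_board_90(f2)
--     orbit = {r0, r1, r2, r3, f0, f1, f2, f3}
--     # Single pass over the input list with O(1) set lookups.
--     for nb in normalized_boards:
--         if nb in orbit: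
--             return True
--     return False
-- ===== Notes on version B (the rewrite author's own statement) =====
-- stated objective: alternative
-- what changed: B inverts the scan: it builds the 8-variant symmetry orbit straight-line into a hash set, then makes ONE pass over normalized_boards testing each element against the set, replacing A's up-to-8 interleaved list scans with early returns.
import Mathlib
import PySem

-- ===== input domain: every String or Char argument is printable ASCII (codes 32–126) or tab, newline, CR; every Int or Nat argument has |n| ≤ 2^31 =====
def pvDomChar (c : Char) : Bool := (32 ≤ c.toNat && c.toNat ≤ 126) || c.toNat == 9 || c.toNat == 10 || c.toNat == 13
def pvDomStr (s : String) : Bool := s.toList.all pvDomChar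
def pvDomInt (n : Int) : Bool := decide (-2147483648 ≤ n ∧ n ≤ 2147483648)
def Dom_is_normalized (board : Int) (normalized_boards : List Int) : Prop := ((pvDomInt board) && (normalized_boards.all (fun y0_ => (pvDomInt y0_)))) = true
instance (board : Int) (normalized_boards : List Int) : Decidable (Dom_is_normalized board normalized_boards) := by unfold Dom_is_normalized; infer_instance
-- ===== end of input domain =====

-- B inverts the scan: it builds the 8-variant symmetry orbit straight-line into
-- a set, then makes one pass over normalized_boards testing membership in the
-- set, replacing A's up-to-8 interleaved list scans (objective: alternative).

-- ===== PORT A =====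
def get_tile_value (board : Int) (tile : Nat) : Int :=
  PySem.Int.band (board >>> (tile * 2)) 3

def rotate_board_90 (board : Int) : Int :=
  let n : Int := 0
  let n := PySem.Int.bor n (get_tile_value board 6)
  let n := PySem.Int.bor n (get_tile_value board 3 <<< 2)
  let n := PySem.Int.bor n (get_tile_value board 0 <<< 4)
  let n := PySem.Int.bor n (get_tile_value board 7 <<< 6)
  let n := PySem.Int.bor n (get_tile_value board 4 <<< 8)
  let n := PySem.Int.bor n (get_tile_value board 1 <<< 10)
  let n := PySem.Int.bor n (get_tile_value board 8 <<< 12)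
  let n := PySem.Int.bor n (get_tile_value board 5 <<< 14)
  let n := PySem.Int.bor n (get_tile_value board 2 <<< 16)
  n

def flip_horizontally (board : Int) : Int :=
  let n : Int := 0
  let n := PySem.Int.bor n ((PySem.Int.band board 63) <<< 12)
  let n := PySem.Int.bor n (PySem.Int.band board (63 <<< 6))
  let n := PySem.Int.bor n (PySem.Int.band (board >>> 12) 63)
  n

-- A's 'for _ in range(k): if board in nbs: return True else: board = rotate …'
-- loop: returns (early-return flag, final board state).
def isnLoopA (k : Nat) (board : Int) (nbs : List Int) : Bool × Int :=
  match k with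
  | 0 => (false, board)
  | k + 1 =>
    if nbs.contains board then (true, board)
    else isnLoopA k (rotate_board_90 board) nbs

def is_normalized (board : Int) (normalized_boards : List Int) : Bool :=
  let r1 := isnLoopA 4 board normalized_boards
  if r1.1 then true
  else
    let board := flip_horizontally r1.2
    let r2 := isnLoopA 4 board normalized_boards
    if r2.1 then true else false

-- ===== PORT B =====
-- B's 'for nb in normalized_boards: if nb in orbit: return True' single pass.
def isnScanB (nbs : List Int) (orbit : PySem.Set Int) : Bool :=
  match nbs with
  | [] => false
  | nb :: rest => if PySem.Set.contains orbit nb then true else isnScanB rest orbit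

def is_normalized_alt (board : Int) (normalized_boards : List Int) : Bool :=
  let r0 := board
  let r1 := rotate_board_90 r0
  let r2 := rotate_board_90 r1
  let r3 := rotate_board_90 r2
  let f0 := flip_horizontally (rotate_board_90 r3)
  let f1 := rotate_board_90 f0
  let f2 := rotate_board_90 f1
  let f3 := rotate_board_90 f2
  let orbit : PySem.Set Int := PySem.Set.ofList [r0, r1, r2, r3, f0, f1, f2, f3]
  isnScanB normalized_boards orbit

-- ===== PRECONDITION & SPEC =====
def Spec_is_normalized (board : Int) (normalized_boards : List Int) (out : Bool) : Prop := out = is_normalized_alt board normalized_boards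
instance (board : Int) (normalized_boards : List Int) (out : Bool) : Decidable (Spec_is_normalized board normalized_boards out) := by unfold Spec_is_normalized; infer_instance

-- ===== CLAIM (what is proved, stated in full; the proofs are below) =====
def Claim_equal_is_normalized : Prop := ∀ (board : Int) (normalized_boards : List Int), Dom_is_normalized board normalized_boards → Spec_is_normalized board normalized_boards (is_normalized board normalized_boards)

-- ===== LEMMAS AND PROOFS =====

-- proof-only helper: the k boards visited by a check-then-rotate loop, and the final state
def orbitLoop (k : Nat) (x : Int) : List Int × Int :=
  match k with
  | 0 => ([], x)
  | k + 1 =>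
    let p := orbitLoop k (rotate_board_90 x)
    (x :: p.1, p.2)

-- B's early-return scan over the list decides 'some list element is in the orbit'.
theorem isnScanB_eq_any (nbs : List Int) (orbit : PySem.Set Int) :
    isnScanB nbs orbit = nbs.any (fun nb => PySem.Set.contains orbit nb) := by
  induction nbs with
  | nil => rfl
  | cons nb rest ih =>
    unfold isnScanB
    rw [List.any_cons, ih]
    cases h : PySem.Set.contains orbit nb <;> simp_all

-- scanning the list for an orbit member = scanning the orbit for a list member
theorem scan_flip (nbs vs : List Int) :
    nbs.any (fun nb => PySem.Set.contains (PySem.Set.ofList vs) nb)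
      = vs.any (fun v => nbs.contains v) := by
  rw [Bool.eq_iff_iff]
  simp only [List.any_eq_true, PySem.Set.contains_iff, PySem.Set.mem_ofList,
    List.contains_eq_mem, decide_eq_true_eq]
  tauto

-- B rewritten as a scan of the two 4-element orbit halves against the list
set_option maxRecDepth 8192 in
theorem alt_eq (b : Int) (nbs : List Int) :
    is_normalized_alt b nbs
      = ((orbitLoop 4 b).1 ++ (orbitLoop 4 (flip_horizontally (orbitLoop 4 b).2)).1).any
          (fun v => nbs.contains v) := by
  unfold is_normalized_alt
  rw [isnScanB_eq_any, scan_flip]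
  rfl

-- A's check-then-rotate loop decides exactly 'some visited board is in the list'
theorem isnLoopA_fst_eq_any (k : Nat) (b : Int) (nbs : List Int) :
    (isnLoopA k b nbs).1 = (orbitLoop k b).1.any (fun v => nbs.contains v) := by
  induction k generalizing b with
  | zero => simp [isnLoopA, orbitLoop]
  | succ k ih =>
    by_cases h : b ∈ nbs
    · simp [isnLoopA, orbitLoop, h]
    · simp [isnLoopA, orbitLoop, h, ih]

-- when no early return fired, A's loop leaves the same final state
theorem isnLoopA_snd (k : Nat) (b : Int) (nbs : List Int)
    (h : (isnLoopA k b nbs).1 = false) :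
    (isnLoopA k b nbs).2 = (orbitLoop k b).2 := by
  induction k generalizing b with
  | zero => simp [isnLoopA, orbitLoop]
  | succ k ih =>
    by_cases hc : b ∈ nbs
    · simp [isnLoopA, hc] at h
    · simp only [isnLoopA, orbitLoop, List.contains_eq_mem, hc, decide_false,
        Bool.false_eq_true, if_false] at h ⊢
      exact ih _ h

-- ===== VERDICT (by name: the statement is the Claim_ definition above) =====
theorem is_normalized_spec : Claim_equal_is_normalized := by
  intro board nbs _
  unfold Spec_is_normalized is_normalized
  rw [alt_eq]
  simp only [List.any_append]
  have hfst := isnLoopA_fst_eq_any 4 board nbs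
  by_cases h1 : (isnLoopA 4 board nbs).1 = true
  · rw [← hfst, h1]
    simp
  · have h1' : (isnLoopA 4 board nbs).1 = false := by simpa using h1
    have hsnd := isnLoopA_snd 4 board nbs h1'
    rw [← hfst, h1', hsnd, isnLoopA_fst_eq_any]
    cases h2 : (orbitLoop 4 (flip_horizontally (orbitLoop 4 board).2)).1.any
        (fun v => nbs.contains v) <;> simp_all
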